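-- pv_equiv track=rewrite | github.com/nthphucai/answer-agnostic-question-generation | fib_questgen/models/qa_generator.py | expand_sentence
-- ===== SOURCE A (Python) =====
-- def expand_sentence(idx, word_list):
--     sentence = [word_list[idx]]
--     for i in range(idx + 1, len(word_list)):
--         if "." in word_list[i] or "?" in word_list[i]:
--             sentence.append(word_list[i])
--             break
--         sentence.append(word_list[i])
--     for i in range(idx - 1, -1, -1):
--         if "." in word_list[i] or "?" in word_list[i]:
--             break
--         sentence.insert(0, word_list[i])
--     if sentence[-1] != ".":
--         sentence.append(".")
--     return " ".join(sentence)
-- ===== SOURCE B (Python) =====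
-- def expand_sentence(idx, word_list):
--     n = len(word_list)
--
--     def has_stop(w):
--         return "." in w or "?" in w
--
--     end = next((i for i in range(idx + 1, n) if has_stop(word_list[i])), n - 1)
--     start = next((i + 1 for i in range(idx - 1, -1, -1) if has_stop(word_list[i])), 0)
--     sentence = word_list[start:end + 1]
--     if sentence[-1] != ".":
--         sentence = sentence + ["."]
--     return " ".join(sentence)
-- ===== Notes on version B (the rewrite author's own statement) =====
-- stated objective: faster
-- what changed: B computes the two boundary indices (first stop token after idx inclusive, first stop token before idx exclusive) and returns one slice of word_list joined, replacing A's incremental list building whose insert(0) prepending is quadratic.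
-- outside the precondition, e.g. on expand_sentence(-1, ['a', 'b']): A returns 'b a b .', B returns 'a b .'; on expand_sentence(2, ['a', 'b']): A raises IndexError, B returns 'a b .'
import Mathlib
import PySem

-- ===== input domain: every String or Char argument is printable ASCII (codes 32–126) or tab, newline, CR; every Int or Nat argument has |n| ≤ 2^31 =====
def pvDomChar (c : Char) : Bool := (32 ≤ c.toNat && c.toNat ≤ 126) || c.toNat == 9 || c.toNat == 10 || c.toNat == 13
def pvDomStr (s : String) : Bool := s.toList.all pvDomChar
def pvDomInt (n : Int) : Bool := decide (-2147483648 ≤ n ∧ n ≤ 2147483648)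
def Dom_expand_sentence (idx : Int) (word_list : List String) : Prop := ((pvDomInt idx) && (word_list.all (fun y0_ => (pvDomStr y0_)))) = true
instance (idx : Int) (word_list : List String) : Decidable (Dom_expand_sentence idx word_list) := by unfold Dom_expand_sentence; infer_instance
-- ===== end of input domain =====

-- B replaces A's incremental sentence building (quadratic insert(0) prepending) by computing the
-- two punctuation-boundary indices and returning a single slice, joined (objective: faster, measured).

set_option maxRecDepth 8192


-- ===== PORT A =====
-- '"." in w or "?" in w'
def pvStopA (w : String) : Bool := PySem.Str.isIn "." w || PySem.Str.isIn "?" w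

-- 'for i in range(idx+1, len(word_list)): … append, break on stop token (after appending it)'
def pvFwdA (word_list : List String) : List Int → List String → List String
  | [], sentence => sentence
  | i :: rest, sentence =>
    let w := PySem.List.pyGetD word_list i ""
    if pvStopA w then sentence ++ [w]
    else pvFwdA word_list rest (sentence ++ [w])

-- 'for i in range(idx-1, -1, -1): break on stop token, else sentence.insert(0, …)'
def pvBwdA (word_list : List String) : List Int → List String → List String
  | [], sentence => sentence
  | i :: rest, sentence =>
    let w := PySem.List.pyGetD word_list i ""
    if pvStopA w then sentence
    else pvBwdA word_list rest (w :: sentence)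

def expand_sentence (idx : Int) (word_list : List String) : String :=
  let sentence := [PySem.List.pyGetD word_list idx ""]   -- word_list[idx]; in range under Pre_
  let sentence := pvFwdA word_list (PySem.List.pyRange (idx + 1) (word_list.length : Int) 1) sentence
  let sentence := pvBwdA word_list (PySem.List.pyRange (idx - 1) (-1) (-1)) sentence
  let sentence := if PySem.List.pyGetD sentence (-1) "" ≠ "." then sentence ++ ["."] else sentence
  PySem.Str.join " " sentence

-- ===== PORT B =====
-- 'has_stop(w)'
def pvStopB (w : String) : Bool := PySem.Str.isIn "." w || PySem.Str.isIn "?" w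

-- 'next((i for i in range(b, n) if has_stop(word_list[i])), n - 1)'
def pvEndB (word_list : List String) (b : Int) : Int :=
  match (PySem.List.pyRange b (word_list.length : Int) 1).find?
      (fun i => pvStopB (PySem.List.pyGetD word_list i "")) with
  | some i => i
  | none => (word_list.length : Int) - 1

-- 'next((i + 1 for i in range(b, -1, -1) if has_stop(word_list[i])), 0)'
def pvStartB (word_list : List String) (b : Int) : Int :=
  match (PySem.List.pyRange b (-1) (-1)).find?
      (fun i => pvStopB (PySem.List.pyGetD word_list i "")) with
  | some i => i + 1
  | none => 0

def expand_sentence_alt (idx : Int) (word_list : List String) : String :=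
  let e := pvEndB word_list (idx + 1)
  let s := pvStartB word_list (idx - 1)
  let sentence := PySem.List.slice word_list (some s) (some (e + 1))
  let sentence := if PySem.List.pyGetD sentence (-1) "" ≠ "." then sentence ++ ["."] else sentence
  PySem.Str.join " " sentence

-- ===== PRECONDITION & SPEC =====
-- Pre_ restricts idx to the helper's natural domain of word positions, 0 ≤ idx < len(word_list):
-- for idx ≥ len or idx < -len A raises IndexError; for -len ≤ idx < 0 (not a word position this
-- sentence-expansion helper is meant for) A's value is an artefact of Python's negative-index
-- wraparound — its forward scan restarts at the list head and repeats tokens — while B returns the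
-- sentence around the wrapped position (see the cited example).
def Pre_expand_sentence (idx : Int) (word_list : List String) : Prop :=
  0 ≤ idx ∧ idx < (word_list.length : Int)
instance (idx : Int) (word_list : List String) : Decidable (Pre_expand_sentence idx word_list) := by
  unfold Pre_expand_sentence; infer_instance

def pvWitness_expand_sentence : Int × List String := (1, ["The", "cat", "sat.", "Next"])

def Spec_expand_sentence (idx : Int) (word_list : List String) (out : String) : Prop := out = expand_sentence_alt idx word_list
instance (idx : Int) (word_list : List String) (out : String) : Decidable (Spec_expand_sentence idx word_list out) := by unfold Spec_expand_sentence; infer_instance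

-- ===== CLAIM (what is proved, stated in full; the proofs are below) =====
def Claim_equal_expand_sentence : Prop := ∀ (idx : Int) (word_list : List String), Dom_expand_sentence idx word_list → Pre_expand_sentence idx word_list → Spec_expand_sentence idx word_list (expand_sentence idx word_list)

-- ===== LEMMAS AND PROOFS =====

theorem pvStop_eq : pvStopB = pvStopA := rfl

-- the forward-collected tokens: everything up to and including the first stop token
def pvTakeThru : List String → List String
  | [] => []
  | w :: t => if pvStopA w then [w] else w :: pvTakeThru t

theorem pvEndB_bounds (wl : List String) (a : Nat) (h : a ≤ wl.length) :
    (a : Int) - 1 ≤ pvEndB wl a ∧ pvEndB wl a ≤ (wl.length : Int) - 1 := by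
  unfold pvEndB
  cases hf : (PySem.List.pyRange (a : Int) (wl.length : Int) 1).find?
      (fun i => pvStopB (PySem.List.pyGetD wl i "")) with
  | none => simp; omega
  | some i =>
    have := List.mem_of_find?_eq_some hf
    rw [PySem.List.mem_pyRange_one] at this
    simp; omega

theorem pvStartB_bounds (wl : List String) (a : Nat) :
    0 ≤ pvStartB wl ((a : Int) - 1) ∧ pvStartB wl ((a : Int) - 1) ≤ (a : Int) := by
  unfold pvStartB
  cases hf : (PySem.List.pyRange ((a : Int) - 1) (-1) (-1)).find?
      (fun i => pvStopB (PySem.List.pyGetD wl i "")) with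
  | none => simp
  | some i =>
    have := List.mem_of_find?_eq_some hf
    rw [PySem.List.mem_pyRange_neg_one] at this
    simp; omega

theorem pvGetD_nat (wl : List String) (a : Nat) (ha : a < wl.length) :
    PySem.List.pyGetD wl (a : Int) "" = wl[a] := by
  simp [PySem.List.pyGetD_natCast, List.getD_eq_getElem?_getD, ha]

theorem pvEndB_at_end (wl : List String) :
    pvEndB wl ((wl.length : Nat) : Int) = (wl.length : Int) - 1 := by
  unfold pvEndB
  rw [PySem.List.pyRange_one_eq_nil le_rfl]
  rfl

theorem pvEndB_cons (wl : List String) (a : Nat) (ha : a < wl.length) :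
    pvEndB wl (a : Int)
      = if pvStopA wl[a] then (a : Int) else pvEndB wl ((a + 1 : Nat) : Int) := by
  unfold pvEndB
  rw [PySem.List.pyRange_one_cons (by exact_mod_cast ha), List.find?_cons, pvGetD_nat wl a ha]
  have hc : (a : Int) + 1 = ((a + 1 : Nat) : Int) := by push_cast; ring
  rw [pvStop_eq, hc]
  by_cases hs : pvStopA wl[a] <;> simp [hs]

theorem pvStartB_neg_one (wl : List String) : pvStartB wl (-1) = 0 := by
  unfold pvStartB
  rw [PySem.List.pyRange_neg_one_eq_nil le_rfl]
  rfl

theorem pvStartB_cons (wl : List String) (a : Nat) (ha : a < wl.length) :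
    pvStartB wl (a : Int)
      = if pvStopA wl[a] then (a : Int) + 1 else pvStartB wl ((a : Int) - 1) := by
  unfold pvStartB
  rw [PySem.List.pyRange_neg_one_cons (by omega), List.find?_cons, pvGetD_nat wl a ha]
  rw [pvStop_eq]
  by_cases hs : pvStopA wl[a] <;> simp [hs]

theorem pvFwdA_eq (wl : List String) :
    ∀ (k a : Nat) (s : List String), a + k = wl.length →
      pvFwdA wl (PySem.List.pyRange (a : Int) (wl.length : Int) 1) s
        = s ++ pvTakeThru (wl.drop a) := by
  intro k
  induction k with
  | zero =>
    intro a s h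
    rw [PySem.List.pyRange_one_eq_nil (by omega)]
    have hd : wl.drop a = [] := List.drop_eq_nil_of_le (by omega)
    simp [pvFwdA, hd, pvTakeThru]
  | succ k ih =>
    intro a s h
    have ha : a < wl.length := by omega
    rw [PySem.List.pyRange_one_cons (by exact_mod_cast ha)]
    have hdrop : wl.drop a = wl[a] :: wl.drop (a + 1) := List.drop_eq_getElem_cons ha
    have hcast : (a : Int) + 1 = ((a + 1 : Nat) : Int) := by push_cast; ring
    simp only [pvFwdA, pvGetD_nat wl a ha]
    rw [hdrop]
    by_cases hs : pvStopA wl[a]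
    · simp only [pvTakeThru, hs, if_true]
    · rw [Bool.not_eq_true] at hs
      simp only [pvTakeThru, hs, Bool.false_eq_true, if_false, hcast]
      rw [ih (a + 1) (s ++ [wl[a]]) (by omega)]
      simp

theorem pvEndB_slice (wl : List String) :
    ∀ (k a : Nat), a + k = wl.length →
      (wl.drop a).take ((pvEndB wl (a : Int) + 1 - a).toNat) = pvTakeThru (wl.drop a) := by
  intro k
  induction k with
  | zero =>
    intro a h
    have : a = wl.length := by omega
    subst this
    rw [pvEndB_at_end]
    have hd : wl.drop wl.length = [] := List.drop_eq_nil_of_le le_rfl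
    simp [hd, pvTakeThru]
  | succ k ih =>
    intro a h
    have ha : a < wl.length := by omega
    have hdrop : wl.drop a = wl[a] :: wl.drop (a + 1) := List.drop_eq_getElem_cons ha
    rw [pvEndB_cons wl a ha]
    by_cases hs : pvStopA wl[a]
    · rw [if_pos hs]
      have h1 : ((a : Int) + 1 - a).toNat = 1 := by omega
      rw [h1, hdrop]
      simp only [pvTakeThru, hs, if_true, List.take_succ_cons, List.take_zero]
    · rw [if_neg hs]
      have he := pvEndB_bounds wl (a + 1) (by omega)
      have h1 : (pvEndB wl ((a + 1 : Nat) : Int) + 1 - (a : Int)).toNat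
          = (pvEndB wl ((a + 1 : Nat) : Int) + 1 - ((a + 1 : Nat) : Int)).toNat + 1 := by
        push_cast at he ⊢; omega
      rw [h1, hdrop, List.take_succ_cons, ih (a + 1) (by omega)]
      rw [Bool.not_eq_true] at hs
      simp only [pvTakeThru, hs, Bool.false_eq_true, if_false]

theorem pvBwdA_eq (wl : List String) :
    ∀ (a : Nat) (s : List String), a ≤ wl.length →
      pvBwdA wl (PySem.List.pyRange ((a : Int) - 1) (-1) (-1)) s
        = (wl.drop (pvStartB wl ((a : Int) - 1)).toNat).take
            ((a : Int) - pvStartB wl ((a : Int) - 1)).toNat ++ s := by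
  intro a
  induction a with
  | zero =>
    intro s _
    have h0 : ((0 : Nat) : Int) - 1 = -1 := by norm_num
    rw [h0, PySem.List.pyRange_neg_one_eq_nil le_rfl, pvStartB_neg_one]
    simp [pvBwdA]
  | succ a ih =>
    intro s ha
    have ha' : a < wl.length := by omega
    have hc0 : ((a + 1 : Nat) : Int) - 1 = (a : Int) := by push_cast; ring
    rw [hc0, PySem.List.pyRange_neg_one_cons (by omega), pvStartB_cons wl a ha']
    simp only [pvBwdA, pvGetD_nat wl a ha']
    by_cases hs : pvStopA wl[a]
    · simp only [hs, if_true]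
      have h1 : (((a + 1 : Nat) : Int) - ((a : Int) + 1)).toNat = 0 := by omega
      rw [h1]
      simp
    · rw [Bool.not_eq_true] at hs
      simp only [hs, Bool.false_eq_true, if_false]
      have hst := pvStartB_bounds wl a
      rw [ih (wl[a] :: s) (by omega)]
      have h1 : (((a + 1 : Nat) : Int) - pvStartB wl ((a : Int) - 1)).toNat
          = ((a : Int) - pvStartB wl ((a : Int) - 1)).toNat + 1 := by push_cast; omega
      rw [h1, List.take_add_one]
      have h2 : (pvStartB wl ((a : Int) - 1)).toNat
          + ((a : Int) - pvStartB wl ((a : Int) - 1)).toNat = a := by omega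
      have h3 : (wl.drop (pvStartB wl ((a : Int) - 1)).toNat)[((a : Int) - pvStartB wl ((a : Int) - 1)).toNat]?
          = some wl[a] := by
        rw [List.getElem?_drop, h2, List.getElem?_eq_getElem ha']
      rw [h3]
      simp

-- the assembled sentence lists agree
theorem pvSentence_eq (wl : List String) (j : Nat) (hj : j < wl.length) :
    pvBwdA wl (PySem.List.pyRange ((j : Int) - 1) (-1) (-1))
        (pvFwdA wl (PySem.List.pyRange ((j : Int) + 1) (wl.length : Int) 1)
          [PySem.List.pyGetD wl (j : Int) ""])
      = PySem.List.slice wl (some (pvStartB wl ((j : Int) - 1)))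
          (some (pvEndB wl ((j : Int) + 1) + 1)) := by
  have hcast : (j : Int) + 1 = ((j + 1 : Nat) : Int) := by push_cast; ring
  rw [hcast, pvGetD_nat wl j hj]
  have hst := pvStartB_bounds wl j
  have hend := pvEndB_bounds wl (j + 1) (by omega)
  set st := pvStartB wl ((j : Int) - 1) with hstdef
  set e := pvEndB wl ((j + 1 : Nat) : Int) with hedef
  rw [pvFwdA_eq wl (wl.length - (j + 1)) (j + 1) _ (by omega),
      pvBwdA_eq wl j _ (by omega)]
  rw [PySem.List.slice_toNat _ (by omega) (by push_cast at hend ⊢; omega)]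
  have harith : (e + 1).toNat - st.toNat
      = ((j : Int) - st).toNat + (1 + (e + 1 - ((j + 1 : Nat) : Int)).toNat) := by
    push_cast at hend ⊢; omega
  rw [harith, List.take_add]
  congr 1
  rw [List.drop_drop]
  have h2 : st.toNat + ((j : Int) - st).toNat = j := by omega
  have h4 : 1 + (e + 1 - ((j + 1 : Nat) : Int)).toNat
      = (e + 1 - ((j + 1 : Nat) : Int)).toNat + 1 := by omega
  rw [h2, h4, List.drop_eq_getElem_cons hj, List.take_succ_cons,
      ← pvEndB_slice wl (wl.length - (j + 1)) (j + 1) (by omega)]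
  simp
  rw [hcast]

-- ===== VERDICT (by name: the statement is the Claim_ definition above) =====
theorem expand_sentence_spec : Claim_equal_expand_sentence := by
  intro idx wl _ hpre
  obtain ⟨h0, hlt⟩ := hpre
  unfold Spec_expand_sentence expand_sentence expand_sentence_alt
  obtain ⟨j, rfl⟩ : ∃ j : Nat, idx = (j : Int) := ⟨idx.toNat, (Int.toNat_of_nonneg h0).symm⟩
  have hj : j < wl.length := by exact_mod_cast hlt
  dsimp only
  rw [pvSentence_eq wl j hj]
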